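-- pv_equiv track=rewrite | github.com/Pyzaaa/AlgorytmyOptymalizacji | optimization.py | create_g_c_mapping
-- ===== SOURCE A (Python) =====
-- def create_g_c_mapping(data, c_s):
--     """
--         Wstępna transformacja informacji grupa->kurs.
--     """
--     mapping = {}
--     for idx, course in enumerate(c_s):
--         group = f'{data[course]["field"]}-{data[course]["degree"]}'
--         if group not in mapping:
--             mapping[group] = []
--         mapping[group].append(idx)
--     return mapping
-- ===== SOURCE B (Python) =====
-- def create_g_c_mapping(data, c_s):
--     """
--         Wstępna transformacja informacji grupa->kurs.
--     """
--     keys = [f'{data[course]["field"]}-{data[course]["degree"]}' for course in c_s]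
--     return {k: [i for i, kk in enumerate(keys) if kk == k]
--             for k in dict.fromkeys(keys)}
-- ===== Notes on version B (the rewrite author's own statement) =====
-- stated objective: alternative
-- what changed: Replaces the one-pass scatter into a mutable dict of lists by a two-phase gather: first materialise the list of group keys, then a dict comprehension over the deduplicated keys collects each group's indices with a per-key scan of the key list.
import Mathlib
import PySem

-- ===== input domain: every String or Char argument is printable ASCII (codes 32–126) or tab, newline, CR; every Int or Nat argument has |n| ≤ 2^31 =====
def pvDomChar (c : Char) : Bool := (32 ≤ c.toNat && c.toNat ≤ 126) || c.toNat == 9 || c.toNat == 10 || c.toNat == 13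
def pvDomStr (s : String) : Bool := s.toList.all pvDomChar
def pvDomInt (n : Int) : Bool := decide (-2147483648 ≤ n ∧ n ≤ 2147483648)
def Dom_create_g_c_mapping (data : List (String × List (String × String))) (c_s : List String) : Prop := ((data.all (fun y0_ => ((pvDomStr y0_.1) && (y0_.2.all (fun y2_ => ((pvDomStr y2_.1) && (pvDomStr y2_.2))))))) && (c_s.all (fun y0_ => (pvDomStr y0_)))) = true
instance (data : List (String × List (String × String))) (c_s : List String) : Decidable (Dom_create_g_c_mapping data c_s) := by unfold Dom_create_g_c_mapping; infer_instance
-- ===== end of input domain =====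

-- B replaces A's one-pass scatter into a mutable dict by a two-phase gather (key list, then a
-- per-key index scan over it for each distinct key, in first-occurrence order); alternative, not faster.

-- shared helper: the f-string key f'{data[course]["field"]}-{data[course]["degree"]}'
def pvGroupKey (data : List (String × List (String × String))) (course : String) : String :=
  let cd := PySem.Dict.getD (PySem.Dict.mk data) course []
  PySem.Str.join "-" [PySem.Dict.getD (PySem.Dict.mk cd) "field" "",
                      PySem.Dict.getD (PySem.Dict.mk cd) "degree" ""]

-- ===== PORT A =====
def create_g_c_mapping (data : List (String × List (String × String))) (c_s : List String) : List (String × List Int) :=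
  ((PySem.List.enumerate c_s 0).foldl
    (fun mapping p =>
      let group := pvGroupKey data p.2
      let mapping := if PySem.Dict.contains mapping group then mapping
                     else PySem.Dict.insert mapping group []
      PySem.Dict.modify mapping group [] (fun l => l ++ [p.1]))
    (PySem.Dict.empty : PySem.Dict String (List Int))).items

-- ===== PORT B =====
def create_g_c_mapping_alt (data : List (String × List (String × String))) (c_s : List String) : List (String × List Int) :=
  let keys := c_s.map (pvGroupKey data)
  (PySem.List.dedup keys).map (fun k =>
    (k, ((PySem.List.enumerate keys 0).filter (fun p => p.2 == k)).map (fun p => p.1)))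

-- ===== PRECONDITION & SPEC =====
-- Pre_: every course of c_s is a key of data and its record has the keys "field" and "degree";
-- on any other input the Python A raises KeyError.
def Pre_create_g_c_mapping (data : List (String × List (String × String))) (c_s : List String) : Prop :=
  (c_s.all (fun course =>
     PySem.Dict.contains (PySem.Dict.mk data) course &&
     (PySem.Dict.contains (PySem.Dict.mk (PySem.Dict.getD (PySem.Dict.mk data) course [])) "field" &&
      PySem.Dict.contains (PySem.Dict.mk (PySem.Dict.getD (PySem.Dict.mk data) course [])) "degree"))) = true
instance (data : List (String × List (String × String))) (c_s : List String) : Decidable (Pre_create_g_c_mapping data c_s) := by unfold Pre_create_g_c_mapping; infer_instance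

def pvWitness_create_g_c_mapping : (List (String × List (String × String))) × List String :=
  ([("a", [("field", "CS"), ("degree", "1")]), ("b", [("field", "CS"), ("degree", "2")])], ["a", "b", "a"])

def Spec_create_g_c_mapping (data : List (String × List (String × String))) (c_s : List String) (out : List (String × List Int)) : Prop := out = create_g_c_mapping_alt data c_s
instance (data : List (String × List (String × String))) (c_s : List String) (out : List (String × List Int)) : Decidable (Spec_create_g_c_mapping data c_s out) := by unfold Spec_create_g_c_mapping; infer_instance

-- ===== CLAIM (what is proved, stated in full; the proofs are below) =====
def Claim_equal_create_g_c_mapping : Prop := ∀ (data : List (String × List (String × String))) (c_s : List String), Dom_create_g_c_mapping data c_s → Pre_create_g_c_mapping data c_s → Spec_create_g_c_mapping data c_s (create_g_c_mapping data c_s)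

-- ===== LEMMAS AND PROOFS =====

-- ensuring the key then appending = Python's d.modify with default []
theorem pv_modify_insert (m : PySem.Dict String (List Int)) (g : String) (i : Int)
    (h : PySem.Dict.contains m g = false) :
    PySem.Dict.modify (PySem.Dict.insert m g []) g [] (fun l => l ++ [i])
    = PySem.Dict.modify m g [] (fun l => l ++ [i]) := by
  have hmem : ∀ p ∈ m.items, (p.1 == g) = false := by
    simp only [PySem.Dict.contains, List.any_eq_false] at h
    intro p hp; simpa using h p hp
  have he : (PySem.Dict.mk (m.items ++ [(g, [])]) : PySem.Dict String (List Int)) = m.insert g [] := by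
    unfold PySem.Dict.insert; simp [h]
  apply PySem.Dict.ext
  unfold PySem.Dict.modify PySem.Dict.insert
  simp only [h, Bool.false_eq_true, if_false]
  simp [List.map_append]
  constructor
  · have hfun : ∀ p ∈ m.items,
        (fun p => if p.1 = g then (g, PySem.Dict.getD (PySem.Dict.mk (m.items ++ [(g, [])])) g [] ++ [i]) else p) p = id p := by
      intro p hp; simp [show p.1 ≠ g from by simpa using hmem p hp]
    rw [List.map_congr_left hfun, List.map_id]
  · rw [he, PySem.Dict.getD_insert_self, PySem.Dict.getD_of_not_contains]
    exact h

theorem pv_step_eq (m : PySem.Dict String (List Int)) (g : String) (i : Int) :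
    PySem.Dict.modify (if PySem.Dict.contains m g then m else PySem.Dict.insert m g []) g []
        (fun l => l ++ [i])
    = PySem.Dict.modify m g [] (fun l => l ++ [i]) := by
  by_cases h : PySem.Dict.contains m g = true
  · simp [h]
  · simp only [Bool.not_eq_true] at h
    simp only [h, Bool.false_eq_true, if_false]
    exact pv_modify_insert m g i h

theorem pv_enumerate_map {α β : Type} (xs : List α) (f : α → β) (s : Int) :
    PySem.List.enumerate (xs.map f) s = (PySem.List.enumerate xs s).map (fun p => (p.1, f p.2)) := by
  induction xs generalizing s with
  | nil => rfl
  | cons x t ih => simp [PySem.List.enumerate_cons, ih]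

-- ===== VERDICT (by name: the statement is the Claim_ definition above) =====
theorem create_g_c_mapping_spec : Claim_equal_create_g_c_mapping := by
  intro data c_s _ _
  unfold Spec_create_g_c_mapping create_g_c_mapping create_g_c_mapping_alt
  set key := pvGroupKey data with hkey
  set enum := PySem.List.enumerate c_s 0 with henum
  -- A's loop body is a plain modify
  have h1 : (enum.foldl
      (fun mapping p =>
        PySem.Dict.modify (if PySem.Dict.contains mapping (key p.2) then mapping
                           else PySem.Dict.insert mapping (key p.2) []) (key p.2) []
          (fun l => l ++ [p.1]))
      (PySem.Dict.empty : PySem.Dict String (List Int)))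
      = (enum.map (fun p => (key p.2, p.1))).foldl
          (fun d q => PySem.Dict.modify d q.1 [] (fun l => l ++ [q.2])) PySem.Dict.empty := by
    rw [List.foldl_map]
    exact List.foldl_ext _ _ _ (fun m p _ => pv_step_eq m (key p.2) p.1)
  rw [h1]
  set l := enum.map (fun p => (key p.2, p.1)) with hl
  set d := l.foldl (fun d q => PySem.Dict.modify d q.1 [] (fun v => v ++ [q.2])) PySem.Dict.empty with hd
  have hnd : d.keys.Nodup := by
    rw [hd]
    exact PySem.Dict.nodup_keys_foldl_modify_key l Prod.fst [] (fun _ q => fun v => v ++ [q.2]) _ PySem.Dict.nodup_keys_empty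
  have hkeys : d.keys = PySem.List.dedup (c_s.map key) := by
    rw [hd]
    rw [show (fun (d : PySem.Dict String (List Int)) (q : String × Int) => PySem.Dict.modify d q.1 [] (fun v => v ++ [q.2]))
          = (fun d q => PySem.Dict.modify d (Prod.fst q) [] ((fun (_ : PySem.Dict String (List Int)) (q : String × Int) => fun v => v ++ [q.2]) d q)) from rfl]
    rw [PySem.Dict.keys_foldl_modify_key]
    simp only [hl, List.map_map]
    congr 1
    rw [show (Prod.fst ∘ fun (p : Int × String) => (key p.2, p.1)) = key ∘ (fun p : Int × String => p.2) from rfl,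
        ← List.map_map, henum, PySem.List.map_snd_enumerate]
  have hgetD : ∀ k, d.getD k [] = (l.filter (fun q => q.1 == k)).map (fun q => q.2) := by
    intro k
    rw [hd, PySem.Dict.getD_foldl_modify_append]
    simp
  rw [PySem.Dict.items_eq_map_keys d hnd [], hkeys]
  apply List.map_congr_left
  intro k hk
  rw [hgetD k]
  rw [hl, pv_enumerate_map, List.filter_map, List.filter_map, List.map_map, List.map_map]
  rfl
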